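-- pv_equiv track=rewrite | github.com/moyu316/jupyter | 1.python/13.grpc/2.response_stream/pointer/util/read_meter.py | find_max_min_y
-- ===== SOURCE A (Python) =====
-- def find_max_min_y(points):  # 找出三个点中位于两端的点
--     # 初始值设为第一个点
--     max_point = points[0]
--     min_point = points[0]
--
--     # 遍历剩余的点
--     for point in points[1:]:
--         # 更新最大值和最小值
--         if point[1] > max_point[1]:
--             max_point = point
--         elif point[1] < min_point[1]:
--             min_point = point
--
--     return min_point, max_point
-- ===== SOURCE B (Python) =====
-- def find_max_min_y(points):
--     min_point = min(points, key=lambda p: p[1])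
--     max_point = max(points, key=lambda p: p[1])
--     return min_point, max_point
-- ===== Notes on version B (the rewrite author's own statement) =====
-- stated objective: idiomatic
-- what changed: Replaces A's hand-written single combined loop (initial point + strict-comparison updates with an elif) by two independent built-in reductions min(points, key=...) and max(points, key=...); first-occurrence tie-breaking coincides.
import Mathlib
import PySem

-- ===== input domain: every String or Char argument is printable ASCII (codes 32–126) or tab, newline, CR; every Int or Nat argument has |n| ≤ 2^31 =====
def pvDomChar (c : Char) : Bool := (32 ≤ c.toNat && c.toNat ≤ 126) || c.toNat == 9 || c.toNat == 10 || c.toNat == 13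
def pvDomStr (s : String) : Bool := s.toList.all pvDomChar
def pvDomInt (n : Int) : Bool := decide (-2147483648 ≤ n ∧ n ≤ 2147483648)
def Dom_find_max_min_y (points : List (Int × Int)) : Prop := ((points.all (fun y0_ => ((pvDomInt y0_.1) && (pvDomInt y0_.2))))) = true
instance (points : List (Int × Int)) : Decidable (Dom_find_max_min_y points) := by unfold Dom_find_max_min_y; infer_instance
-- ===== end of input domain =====

-- B replaces A's single combined loop by two independent built-in min/max reductions (idiomatic; same cost).

-- ===== PORT A =====
-- A: seed max_point = min_point = points[0], then one loop over points[1:] with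
-- 'if point[1] > max_point[1]: ... elif point[1] < min_point[1]: ...'; returns (min_point, max_point).
def find_max_min_y (points : List (Int × Int)) : (Int × Int) × (Int × Int) :=
  match points with
  | [] => ((0, 0), (0, 0))  -- unreachable: Python raises IndexError here; Pre_ excludes []
  | p0 :: rest =>
    let st := rest.foldl
      (fun (st : (Int × Int) × (Int × Int)) point =>
        if point.2 > st.1.2 then (point, st.2)
        else if point.2 < st.2.2 then (st.1, point)
        else st)
      (p0, p0)   -- (max_point, min_point)
    (st.2, st.1)

-- ===== PORT B =====
-- B: min(points, key=lambda p: p[1]) and max(points, key=lambda p: p[1]) (both raise on []).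
def find_max_min_y_alt (points : List (Int × Int)) : (Int × Int) × (Int × Int) :=
  match PySem.List.min? points (fun p => p.2), PySem.List.max? points (fun p => p.2) with
  | some mn, some mx => (mn, mx)
  | _, _ => ((0, 0), (0, 0))  -- unreachable: Python raises ValueError here; Pre_ excludes []

-- ===== PRECONDITION & SPEC =====
-- Pre_ excludes only the empty list, on which A raises IndexError (and B raises ValueError).
def Pre_find_max_min_y (points : List (Int × Int)) : Prop := points ≠ []
instance (points : List (Int × Int)) : Decidable (Pre_find_max_min_y points) := by unfold Pre_find_max_min_y; infer_instance
def pvWitness_find_max_min_y : (List (Int × Int)) := [(1, 2), (3, -1), (0, 5)]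

def Spec_find_max_min_y (points : List (Int × Int)) (out : (Int × Int) × (Int × Int)) : Prop := out = find_max_min_y_alt points
instance (points : List (Int × Int)) (out : (Int × Int) × (Int × Int)) : Decidable (Spec_find_max_min_y points out) := by unfold Spec_find_max_min_y; infer_instance

-- ===== CLAIM (what is proved, stated in full; the proofs are below) =====
def Claim_equal_find_max_min_y : Prop := ∀ (points : List (Int × Int)), Dom_find_max_min_y points → Pre_find_max_min_y points → Spec_find_max_min_y points (find_max_min_y points)

-- ===== LEMMAS AND PROOFS =====

-- min over a nonempty list is the plain first-min running foldl.
lemma min?_foldl : ∀ (t : List (Int × Int)) (x : Int × Int),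
    PySem.List.min? (x :: t) (fun p => p.2)
      = some (t.foldl (fun a b => if b.2 < a.2 then b else a) x) := by
  intro t
  induction t with
  | nil => intro x; rfl
  | cons q t ih =>
    intro x
    by_cases h : q.2 < x.2 <;>
      simp only [PySem.List.min?, List.foldl_cons, h, if_true, if_false] at ih ⊢ <;>
      [exact ih q; exact ih x]

-- max over a nonempty list is the plain first-max running foldl.
lemma max?_foldl : ∀ (t : List (Int × Int)) (x : Int × Int),
    PySem.List.max? (x :: t) (fun p => p.2)
      = some (t.foldl (fun a b => if a.2 < b.2 then b else a) x) := by
  intro t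
  induction t with
  | nil => intro x; rfl
  | cons q t ih =>
    intro x
    by_cases h : x.2 < q.2 <;>
      simp only [PySem.List.max?, List.foldl_cons, h, if_true, if_false] at ih ⊢ <;>
      [exact ih q; exact ih x]

-- A's combined loop splits into the two independent reductions, under the invariant min ≤ max.
lemma foldl_pair_split (t : List (Int × Int)) : ∀ (mx mn : Int × Int), mn.2 ≤ mx.2 →
    t.foldl (fun (st : (Int × Int) × (Int × Int)) point =>
        if point.2 > st.1.2 then (point, st.2)
        else if point.2 < st.2.2 then (st.1, point)
        else st) (mx, mn)
      = (t.foldl (fun a b => if a.2 < b.2 then b else a) mx,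
         t.foldl (fun a b => if b.2 < a.2 then b else a) mn) := by
  induction t with
  | nil => intro mx mn _; rfl
  | cons q t ih =>
    intro mx mn h
    simp only [List.foldl_cons]
    by_cases h1 : q.2 > mx.2
    · rw [if_pos h1, if_pos (by omega : mx.2 < q.2), if_neg (by omega : ¬ q.2 < mn.2)]
      exact ih q mn (by omega)
    · rw [if_neg h1, if_neg (by omega : ¬ mx.2 < q.2)]
      by_cases h2 : q.2 < mn.2
      · rw [if_pos h2, if_pos h2]; exact ih mx q (by omega)
      · rw [if_neg h2, if_neg h2]; exact ih mx mn h

-- ===== VERDICT (by name: the statement is the Claim_ definition above) =====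
theorem find_max_min_y_spec : Claim_equal_find_max_min_y := by
  intro points _ hpre
  match points, hpre with
  | p0 :: rest, _ =>
    show _ = _
    simp only [find_max_min_y, find_max_min_y_alt, min?_foldl, max?_foldl,
      foldl_pair_split rest p0 p0 le_rfl]
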